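/- GENERATED by tools/from_farm_form.py from prooffarm-gif/accepted/DGifDecompressLine.14/Proof.lean (a worked proof of the farm's unit `DGifDecompressLine.14`,
   accepted by the verdict) — do not edit. -/
import Gif.Spec.Units.DGifDecompressLine_14
import Gif.Spec.AllSegs
import Gif.Spec.Proved.DGifDecompressLine_14_Lemmas

open X86 X86.User Asan ProgX.Base ProgX.Base.Spec Gif.Spec

/-!
  `DGifDecompressLine.14` (0x106f43 … 0x106f7d, 14 instructions; dgif_lib.c:986-988 and 995): the arm `CrntCode == RunningCode − 2`
  of the table update behind the arms of the main loop. A BODY SEGMENT OF A PROTECTED FUNCTION WITH A CALL IN THE MIDDLE: the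
  return address 0x106f53 (`ret31`) of the call of `DGifGetPrefixChar` is made a cut of the unit's own, with the entry's assertion
  family (`UpdRC` at the label `ret31`); the two walks are in Lemmas.lean, chained here.
-/

/-- Segment 14 of `DGifDecompressLine` takes `UpdRC` at 0x106f43 to the head of the main loop 0x106f7d with a smaller measure. -/
theorem Gif.Spec.Proved.DGifDecompressLine_14_ok : Gif.Spec.DGifDecompressLine_14.Statement := by
  intro Lay hLay μ hμ u₀ hcode h_DGifGetPrefixChar h_asan_store1_noabort H rest frames F R n m e ret v hat
  -- the callee's contract for the frame list of the body (the own frame in front) and the private object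
  have hgpc := h_DGifGetPrefixChar H rest (DGifDecompressLine.framesIn frames e) F.pv
  -- 0x106f43 … the call (dgif_lib.c:987) … 0x106f53
  refine (Gif.Spec.DGifDecompressLine_14.dl14_seg_call Lay hLay μ hμ u₀ hcode H rest frames F R n m e ret hgpc v hat).trans ?_
  -- 0x106f53 … the checked store (dgif_lib.c:986), `LastCode = CrntCode` (dgif_lib.c:995) … 0x106f7d
  intro v1 hv1
  exact Gif.Spec.DGifDecompressLine_14.dl14_seg_tail Lay hLay μ hμ u₀ hcode H rest frames F R n m e ret
    h_asan_store1_noabort v1 hv1
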